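-- pv_equiv track=rewrite | github.com/kagemeka/cptol | atcoder-submissions/jp.atcoder/abc115/abc115_d/9431272.py | make_burger
-- ===== SOURCE A (Python) =====
-- def make_burger(n):
--     patty = [None] * (n + 1)
--     bun = [None] * (n + 1)
--     patty[0] = 1
--     bun[0] = 0
--     burger = [None] * (n + 1)
--     burger[0] = 1
--     for i in range(n):
--         patty[i+1] = patty[i] * 2 + 1
--         bun[i+1] = bun[i] * 2 + 2
--         burger[i+1] = patty[i+1] + bun[i+1]
--     return burger, patty
-- ===== SOURCE B (Python) =====
-- def make_burger(n):
--     burger = [(1 << (i + 2)) - 3 for i in range(n + 1)]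
--     patty = [(1 << (i + 1)) - 1 for i in range(n + 1)]
--     return burger, patty
-- ===== Notes on version B (the rewrite author's own statement) =====
-- stated objective: simpler
-- what changed: Replaces the step-by-step doubling recurrence over preallocated None-lists (and the auxiliary bun array) with direct closed-form list comprehensions patty[i]=(1<<(i+1))-1 and burger[i]=(1<<(i+2))-3.
import Mathlib
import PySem

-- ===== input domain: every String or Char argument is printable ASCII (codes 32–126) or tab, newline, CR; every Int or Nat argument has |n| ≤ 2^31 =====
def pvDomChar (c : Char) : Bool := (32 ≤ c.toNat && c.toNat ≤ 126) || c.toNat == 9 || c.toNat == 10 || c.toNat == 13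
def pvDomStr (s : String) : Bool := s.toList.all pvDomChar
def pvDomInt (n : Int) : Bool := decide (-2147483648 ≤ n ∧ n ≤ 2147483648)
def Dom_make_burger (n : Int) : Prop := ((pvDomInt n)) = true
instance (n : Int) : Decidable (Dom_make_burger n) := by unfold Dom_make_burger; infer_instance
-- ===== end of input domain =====

-- B replaces A's doubling recurrence (with its auxiliary bun array) by closed-form
-- comprehensions; equivalence is proved on Pre_ (0 ≤ n), where A returns normally.

-- ===== PORT A =====
-- A's for-loop over range(n): state = (burger list so far, patty list so far,
-- current patty value, current bun value); each step appends the newly assigned cells.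
def make_burger (n : Int) : List Int × List Int :=
  let st := (PySem.List.pyRange 0 n 1).foldl
    (fun (st : List Int × List Int × Int × Int) _ =>
      let p := st.2.2.1 * 2 + 1
      let b := st.2.2.2 * 2 + 2
      (st.1 ++ [p + b], st.2.1 ++ [p], p, b))
    ([1], [1], 1, 0)
  (st.1, st.2.1)

-- ===== PORT B =====
def make_burger_alt (n : Int) : List Int × List Int :=
  ((List.range (n + 1).toNat).map (fun i => ((1 <<< (i + 2) : Nat) : Int) - 3),
   (List.range (n + 1).toNat).map (fun i => ((1 <<< (i + 1) : Nat) : Int) - 1))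

-- ===== PRECONDITION & SPEC =====
-- Pre_: for n < 0 the Python A raises IndexError (patty[0] = 1 on an empty list).
def Pre_make_burger (n : Int) : Prop := 0 ≤ n
instance (n : Int) : Decidable (Pre_make_burger n) := by unfold Pre_make_burger; infer_instance
def pvWitness_make_burger : Int := 3

def Spec_make_burger (n : Int) (out : List Int × List Int) : Prop := out = make_burger_alt n
instance (n : Int) (out : List Int × List Int) : Decidable (Spec_make_burger n out) := by unfold Spec_make_burger; infer_instance

-- ===== CLAIM (what is proved, stated in full; the proofs are below) =====
def Claim_equal_make_burger : Prop := ∀ (n : Int), Dom_make_burger n → Pre_make_burger n → Spec_make_burger n (make_burger n)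

-- ===== LEMMAS AND PROOFS =====

-- Invariant of A's loop after k iterations.
lemma make_burger_fold (k : Nat) :
    (PySem.List.pyRange 0 (k : Int) 1).foldl
      (fun (st : List Int × List Int × Int × Int) _ =>
        let p := st.2.2.1 * 2 + 1
        let b := st.2.2.2 * 2 + 2
        (st.1 ++ [p + b], st.2.1 ++ [p], p, b))
      ([1], [1], 1, 0)
    = ((List.range (k + 1)).map (fun i => (2 : Int) ^ (i + 2) - 3),
       (List.range (k + 1)).map (fun i => (2 : Int) ^ (i + 1) - 1),
       (2 : Int) ^ (k + 1) - 1, (2 : Int) ^ (k + 1) - 2) := by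
  induction k with
  | zero => simp [PySem.List.pyRange_one_eq_nil]
  | succ k ih =>
    have h : ((k : Int) + 1) = ((k + 1 : Nat) : Int) := by push_cast; ring
    rw [show ((k + 1 : Nat) : Int) = (k : Int) + 1 by push_cast; ring,
        PySem.List.pyRange_one_succ_right (by positivity),
        List.foldl_append, ih]
    simp [List.range_succ]
    and_intros <;> ring

-- ===== VERDICT (by name: the statement is the Claim_ definition above) =====
theorem make_burger_spec : Claim_equal_make_burger := by
  intro n _ hpre
  obtain ⟨k, rfl⟩ : ∃ k : Nat, n = (k : Int) := ⟨n.toNat, (Int.toNat_of_nonneg hpre).symm⟩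
  show make_burger (k : Int) = make_burger_alt (k : Int)
  unfold make_burger make_burger_alt
  rw [make_burger_fold]
  have h : ((k : Int) + 1).toNat = k + 1 := by omega
  rw [h]
  simp [Nat.one_shiftLeft]
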